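-- pv_equiv track=rewrite | github.com/osipm01/inf-ege-2025 | 19/19-27826.py | f
-- ===== SOURCE A (Python) =====
-- def f(x, h):
--     if x >= 65 and h == 3:
--         return 1
--     elif x >= 65 and h > 3:
--         return 0
--     elif x < 65 and h == 3:
--         return 0
--     else:
--         if h % 2 == 0:
--             return f(x + 1, h + 1) or f(x + 2, h + 1) or f(x * 3, h + 1)
--         else:
--             return f(x + 1, h + 1) or f(x + 2, h + 1)  or f(x * 3, h + 1)
-- ===== SOURCE B (Python) =====
-- def f(x, h):
--     # Closed-form reachability: the three moves (+1, +2, *3) are monotone, so a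
--     # leaf >= 65 exists iff the maximal reachable value is >= 65; tracking the
--     # single running maximum max(m + 2, 3 * m) replaces the recursion tree.
--     if h > 3:
--         return 0
--     m = x
--     for _ in range(3 - h):
--         m = max(m + 2, 3 * m)
--     return 1 if m >= 65 else 0
-- ===== Notes on version B (the rewrite author's own statement) =====
-- stated objective: alternative
-- what changed: Replaces A's three-way recursion over the game tree by a single loop that tracks only the maximal reachable value m := max(m+2, 3*m), using monotonicity of the three moves; h>3 returns 0 up front.
-- outside the precondition, e.g. on f(100, -9500): A returns 1, B returns 1; on f(5, -20000): A raises RecursionError, B returns 1; on f(0, 4): A does not finish within the time limit, B returns 0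
import Mathlib
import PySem

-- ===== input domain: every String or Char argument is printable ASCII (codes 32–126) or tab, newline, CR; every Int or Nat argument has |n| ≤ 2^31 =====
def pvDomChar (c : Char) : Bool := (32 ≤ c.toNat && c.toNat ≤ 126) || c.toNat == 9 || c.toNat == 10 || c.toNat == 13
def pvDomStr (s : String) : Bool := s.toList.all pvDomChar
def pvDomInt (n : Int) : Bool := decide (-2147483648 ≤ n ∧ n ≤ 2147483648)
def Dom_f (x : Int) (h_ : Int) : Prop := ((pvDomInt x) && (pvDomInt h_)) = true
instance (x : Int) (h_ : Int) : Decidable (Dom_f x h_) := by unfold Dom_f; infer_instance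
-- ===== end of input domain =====

-- B replaces A's three-way recursion over the game tree by a loop on the
-- running maximum (monotonicity of the moves +1, +2, *3): a different algorithm.

-- ===== PORT A =====
-- A's recursion, fuelled.  The fuel is only a totality guard: inside Pre_f it
-- always exceeds the true recursion depth, so the fuel-0 branch is dead code.
-- Python's short-circuiting `a or b or c` is the if-chain below
-- (first non-zero operand, else the last), evaluated left to right as in A.
def fAux : Nat → Int → Int → Int
  | 0, _, _ => 0
  | n + 1, x, h_ =>
    if x ≥ 65 ∧ h_ = 3 then 1
    else if x ≥ 65 ∧ h_ > 3 then 0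
    else if x < 65 ∧ h_ = 3 then 0
    else if h_ % 2 = 0 then
      (let r1 := fAux n (x + 1) (h_ + 1)
       if r1 ≠ 0 then r1 else
         let r2 := fAux n (x + 2) (h_ + 1)
         if r2 ≠ 0 then r2 else fAux n (x * 3) (h_ + 1))
    else
      (let r1 := fAux n (x + 1) (h_ + 1)
       if r1 ≠ 0 then r1 else
         let r2 := fAux n (x + 2) (h_ + 1)
         if r2 ≠ 0 then r2 else fAux n (x * 3) (h_ + 1))

def f (x : Int) (h_ : Int) : Int :=
  fAux ((if h_ ≤ 3 then 3 - h_ else 65 - x).toNat + 1) x h_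

-- ===== PORT B =====
def bStep (m : Int) : Int := max (m + 2) (3 * m)

-- the `for _ in range(n)` loop of Source B
def bLoop : Nat → Int → Int
  | 0, m => m
  | n + 1, m => bLoop n (bStep m)

def f_alt (x : Int) (h_ : Int) : Int :=
  if h_ > 3 then 0
  else if bLoop (3 - h_).toNat x ≥ 65 then 1 else 0

-- ===== PRECONDITION & SPEC =====
-- Pre_f excludes exactly the inputs on which A never returns a value:
-- h_ < -9000, where the recursion depth 3-h_ reaches the interpreter's
-- recursion limit and A raises RecursionError (the cutoff leaves a small
-- safety margin below the exact, stack-dependent limit), and h_ > 3 with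
-- x ≤ 0, where the x*3 branch stays ≤ 0 forever and A recurses without end.
def Pre_f (x : Int) (h_ : Int) : Prop := (-9000 ≤ h_ ∧ h_ ≤ 3) ∨ (3 < h_ ∧ 1 ≤ x)
instance (x : Int) (h_ : Int) : Decidable (Pre_f x h_) := by unfold Pre_f; infer_instance
def pvWitness_f : Int × Int := (5, 1)

def Spec_f (x : Int) (h_ : Int) (out : Int) : Prop := out = f_alt x h_
instance (x : Int) (h_ : Int) (out : Int) : Decidable (Spec_f x h_ out) := by unfold Spec_f; infer_instance

-- ===== CLAIM (what is proved, stated in full; the proofs are below) =====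
def Claim_equal_f : Prop := ∀ (x : Int) (h_ : Int), Dom_f x h_ → Pre_f x h_ → Spec_f x h_ (f x h_)

-- ===== LEMMAS AND PROOFS =====

-- Python's `a or b` on ints, as a function: used only to STATE the unfolding
-- lemma fAux_succ below (the if-chain in fAux is definitionally this).
def pyOr (a : Int) (b : Int) : Int := if a ≠ 0 then a else b

theorem bLoop_mono (n : Nat) : ∀ {a b : Int}, a ≤ b → bLoop n a ≤ bLoop n b := by
  induction n with
  | zero => intro a b h; simpa [bLoop] using h
  | succ n ih =>
    intro a b h
    have : bStep a ≤ bStep b := by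
      unfold bStep
      exact max_le_max (by omega) (by omega)
    simpa [bLoop] using ih this

theorem bLoop_max (n : Nat) (a b : Int) :
    bLoop n (max a b) = max (bLoop n a) (bLoop n b) := by
  rcases le_total a b with h | h
  · rw [max_eq_right h, max_eq_right (bLoop_mono n h)]
  · rw [max_eq_left h, max_eq_left (bLoop_mono n h)]

theorem fAux_succ (n : Nat) (x h_ : Int) :
    fAux (n + 1) x h_ =
      (if x ≥ 65 ∧ h_ = 3 then 1
       else if x ≥ 65 ∧ h_ > 3 then 0
       else if x < 65 ∧ h_ = 3 then 0
       else if h_ % 2 = 0 then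
         pyOr (fAux n (x + 1) (h_ + 1)) (pyOr (fAux n (x + 2) (h_ + 1)) (fAux n (x * 3) (h_ + 1)))
       else
         pyOr (fAux n (x + 1) (h_ + 1)) (pyOr (fAux n (x + 2) (h_ + 1)) (fAux n (x * 3) (h_ + 1)))) := rfl

-- A on the exploration levels computes the indicator of "some leaf ≥ 65",
-- which by monotonicity is the indicator of "the maximal leaf ≥ 65" = B's loop.
theorem pyOr_indicator (p q r : Prop) [Decidable p] [Decidable q] [Decidable r]
    (hpq : p → q) :
    pyOr (if p then (1 : Int) else 0) (pyOr (if q then (1 : Int) else 0) (if r then (1 : Int) else 0)) =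
      (if q ∨ r then (1 : Int) else 0) := by
  by_cases hq : q
  · by_cases hr : r <;> by_cases hp : p <;> simp [pyOr, hp, hq, hr]
  · by_cases hp : p
    · exact absurd (hpq hp) hq
    · by_cases hr : r <;> simp [pyOr, hp, hq, hr]

theorem fAux_eq_bLoop : ∀ (n : Nat) (x h_ : Int), h_ + n = 3 →
    fAux (n + 1) x h_ = (if bLoop n x ≥ 65 then 1 else 0) := by
  intro n
  induction n with
  | zero =>
    intro x h_ hh
    have : h_ = 3 := by omega
    subst this
    show fAux (0 + 1) x 3 = if x ≥ 65 then 1 else 0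
    rw [fAux_succ]
    by_cases hx : x ≥ 65
    · rw [if_pos ⟨hx, rfl⟩, if_pos hx]
    · rw [if_neg (fun h => hx h.1), if_neg (by omega : ¬ (x ≥ 65 ∧ (3 : Int) > 3)),
        if_pos (⟨by omega, rfl⟩ : x < 65 ∧ (3 : Int) = 3), if_neg hx]
  | succ n ih =>
    intro x h_ hh
    have h1 : fAux (n + 1) (x + 1) (h_ + 1) = (if bLoop n (x + 1) ≥ 65 then 1 else 0) :=
      ih (x + 1) (h_ + 1) (by omega)
    have h2 : fAux (n + 1) (x + 2) (h_ + 1) = (if bLoop n (x + 2) ≥ 65 then 1 else 0) :=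
      ih (x + 2) (h_ + 1) (by omega)
    have h3 : fAux (n + 1) (x * 3) (h_ + 1) = (if bLoop n (x * 3) ≥ 65 then 1 else 0) :=
      ih (x * 3) (h_ + 1) (by omega)
    have hb : bLoop (n + 1) x = max (bLoop n (x + 2)) (bLoop n (x * 3)) := by
      show bLoop n (bStep x) = _
      rw [bStep, mul_comm (3 : Int) x, bLoop_max]
    have hmono : bLoop n (x + 1) ≤ bLoop n (x + 2) := bLoop_mono n (by omega)
    have hmax : (bLoop (n + 1) x ≥ 65) = (bLoop n (x + 2) ≥ 65 ∨ bLoop n (x * 3) ≥ 65) := by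
      rw [hb]; simp [ge_iff_le]
    rw [fAux_succ,
      if_neg (by omega : ¬ (x ≥ 65 ∧ h_ = 3)),
      if_neg (by omega : ¬ (x ≥ 65 ∧ h_ > 3)),
      if_neg (by omega : ¬ (x < 65 ∧ h_ = 3)),
      ite_self, h1, h2, h3]
    simp only [hmax]
    exact pyOr_indicator _ _ _ (fun h => le_trans h hmono)

-- For h_ > 3 with x ≥ 1 A always returns 0 (Python reaches x ≥ 65 and stops).
theorem fAux_gt3 : ∀ (n : Nat) (x h_ : Int), 3 < h_ → 1 ≤ x → 65 - x ≤ (n : Int) →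
    fAux (n + 1) x h_ = 0 := by
  intro n
  induction n with
  | zero =>
    intro x h_ hg hx hn
    rw [fAux_succ]
    split_ifs <;> omega
  | succ n ih =>
    intro x h_ hg hx hn
    by_cases hx65 : x ≥ 65
    · rw [fAux_succ]
      split_ifs <;> omega
    · have h1 := ih (x + 1) (h_ + 1) (by omega) (by omega) (by push_cast at hn ⊢; omega)
      have h2 := ih (x + 2) (h_ + 1) (by omega) (by omega) (by push_cast at hn ⊢; omega)
      have h3 := ih (x * 3) (h_ + 1) (by omega) (by omega) (by push_cast at hn ⊢; omega)
      rw [fAux_succ,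
        if_neg (by omega : ¬ (x ≥ 65 ∧ h_ = 3)),
        if_neg (by omega : ¬ (x ≥ 65 ∧ h_ > 3)),
        if_neg (by omega : ¬ (x < 65 ∧ h_ = 3)),
        ite_self, h1, h2, h3]
      simp [pyOr]

-- ===== VERDICT (by name: the statement is the Claim_ definition above) =====
theorem f_spec : Claim_equal_f := by
  intro x h_ _ hpre
  unfold Spec_f f f_alt
  rcases hpre with ⟨_, hle⟩ | ⟨hgt, hx⟩
  · rw [if_pos hle, if_neg (by omega : ¬ h_ > 3)]
    have hn : h_ + ((3 - h_).toNat : Int) = 3 := by omega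
    exact fAux_eq_bLoop (3 - h_).toNat x h_ hn
  · rw [if_neg (by omega : ¬ h_ ≤ 3), if_pos hgt]
    exact fAux_gt3 (65 - x).toNat x h_ hgt (by omega) (by omega)
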